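-- pv_equiv track=rewrite | github.com/siimveske/AOC | 2024/day20/day_20_race_condition.py | count_cheats
-- ===== SOURCE A (Python) =====
-- def count_cheats(path: list[tuple[int, int]], max_distance: int, threshold: int) -> int:
--     """
--     Counts the number of potential "cheating" opportunities in a path.
--
--     Args:
--         path: List of (row, col) coordinates representing the full path
--         max_distance: Maximum Manhattan distance allowed between two points
--         threshold: Minimum path length savings required to count as a cheat
--     """
--     result = 0
--     # Compare each point with all subsequent points in the path
--     for a in range(len(path)- 1):
--         r1, c1 = path[a]
--         for b in range(a + 1, len(path)):  # start from a+1 to avoid redundant checks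
--             r2, c2 = path[b]
--             # Calculate Manhattan distance between points
--             distance = abs(r1 - r2) + abs(c1 - c2)
--             # Skip if points are too far apart
--             if distance > max_distance:
--                 continue
--
--             # Calculate how many steps would be saved by "cheating"
--             # b-a is the number of steps in the original path
--             # distance is the direct path length
--             # The difference represents potential steps saved
--             savings = b - a - distance
--
--             # Count this as a cheat if savings meets the threshold
--             if savings >= threshold:
--                 result += 1
--     return result
-- ===== SOURCE B (Python) =====
-- def count_cheats(path: list[tuple[int, int]], max_distance: int, threshold: int) -> int:
--     """Single forward pass with an incremental spatial index.
--
--     Earlier path points are kept in a dict keyed by row; each new point is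
--     matched only against buckets of rows within max_distance (whole rows that
--     are already too far apart are pruned without looking at their points).
--     """
--     rows = {}  # row -> list of (col, index) of the points already visited
--     total = 0
--     for b, (r2, c2) in enumerate(path):
--         for r1, bucket in rows.items():
--             dr = abs(r1 - r2)
--             if dr > max_distance:
--                 continue
--             for c1, a in bucket:
--                 d = dr + abs(c1 - c2)
--                 if d <= max_distance and b - a - d >= threshold:
--                     total += 1
--         rows[r2] = rows.get(r2, []) + [(c2, b)]
--     return total
-- ===== Notes on version B (the rewrite author's own statement) =====
-- stated objective: alternative
-- what changed: B replaces A's all-pairs double index loop with a single forward pass that keeps the already-visited points in a dict keyed by row and matches each new point only against the buckets of rows within max_distance, pruning whole rows without touching their points.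
import Mathlib
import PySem

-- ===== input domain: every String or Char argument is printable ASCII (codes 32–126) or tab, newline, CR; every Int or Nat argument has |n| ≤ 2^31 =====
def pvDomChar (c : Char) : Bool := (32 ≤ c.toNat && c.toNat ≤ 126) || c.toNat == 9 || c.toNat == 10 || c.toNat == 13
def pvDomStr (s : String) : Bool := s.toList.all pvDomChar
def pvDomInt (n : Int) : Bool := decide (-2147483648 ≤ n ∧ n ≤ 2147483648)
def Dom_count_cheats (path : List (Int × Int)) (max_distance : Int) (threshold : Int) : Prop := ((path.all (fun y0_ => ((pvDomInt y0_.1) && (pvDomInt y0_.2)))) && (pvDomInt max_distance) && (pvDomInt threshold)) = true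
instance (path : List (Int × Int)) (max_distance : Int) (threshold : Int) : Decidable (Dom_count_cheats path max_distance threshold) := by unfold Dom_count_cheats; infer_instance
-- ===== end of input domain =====

-- B replaces A's all-pairs double index loop by a single forward pass keeping the visited
-- points in a row-keyed dict and matching each new point only against row buckets within
-- max_distance: an alternative algorithm/data structure of the same worst-case cost.

-- ===== PORT A =====
-- literal transliteration of A's nested index loops
def count_cheats (path : List (Int × Int)) (max_distance : Int) (threshold : Int) : Int :=
  (PySem.List.pyRange 0 ((path.length : Int) - 1) 1).foldl (fun result a =>
    let p1 := PySem.List.pyGetD path a (0, 0)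
    (PySem.List.pyRange (a + 1) (path.length : Int) 1).foldl (fun result b =>
      let p2 := PySem.List.pyGetD path b (0, 0)
      let distance := |p1.1 - p2.1| + |p1.2 - p2.2|
      if distance > max_distance then result
      else if b - a - distance ≥ threshold then result + 1
      else result) result) 0

-- ===== PORT B =====
-- literal transliteration of Source B: one pass over enumerate(path) with state (rows, total);
-- `rows[r2] = rows.get(r2, []) + [(c2, b)]` (= setdefault+append) is PySem.Dict.modify
def count_cheats_alt (path : List (Int × Int)) (max_distance : Int) (threshold : Int) : Int :=
  ((PySem.List.enumerate path 0).foldl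
    (fun (st : PySem.Dict Int (List (Int × Int)) × Int) e =>
      let b := e.1
      let r2 := e.2.1
      let c2 := e.2.2
      let total := st.1.items.foldl (fun total kv =>
        let dr := |kv.1 - r2|
        if dr > max_distance then total
        else kv.2.foldl (fun total ca =>
          let d := dr + |ca.1 - c2|
          if d ≤ max_distance ∧ b - ca.2 - d ≥ threshold then total + 1 else total) total)
        st.2
      (st.1.modify r2 [] (· ++ [(c2, b)]), total))
    (PySem.Dict.empty, 0)).2

-- ===== PRECONDITION & SPEC =====
def Spec_count_cheats (path : List (Int × Int)) (max_distance : Int) (threshold : Int) (out : Int) : Prop := out = count_cheats_alt path max_distance threshold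
instance (path : List (Int × Int)) (max_distance : Int) (threshold : Int) (out : Int) : Decidable (Spec_count_cheats path max_distance threshold out) := by unfold Spec_count_cheats; infer_instance

-- ===== CLAIM (what is proved, stated in full; the proofs are below) =====
def Claim_equal_count_cheats : Prop := ∀ (path : List (Int × Int)) (max_distance : Int) (threshold : Int), Dom_count_cheats path max_distance threshold → Spec_count_cheats path max_distance threshold (count_cheats path max_distance threshold)

-- ===== LEMMAS AND PROOFS =====

-- the pair indicator (Nat indices)
def pvInd (path : List (Int × Int)) (max_distance : Int) (threshold : Int) (a b : Nat) : Int :=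
  let p1 := path.getD a (0, 0)
  let p2 := path.getD b (0, 0)
  let d := |p1.1 - p2.1| + |p1.2 - p2.2|
  if d ≤ max_distance ∧ threshold ≤ (b : Int) - (a : Int) - d then 1 else 0

lemma sum_map_range (N : Nat) (φ : Nat → Int) :
    ((List.range N).map φ).sum = ∑ k ∈ Finset.range N, φ k := rfl

-- Int-indexed indicator, as port A sees it
def gI (path : List (Int × Int)) (D T : Int) (a b : Int) : Int :=
  let p1 := PySem.List.pyGetD path a (0, 0)
  let p2 := PySem.List.pyGetD path b (0, 0)
  let d := |p1.1 - p2.1| + |p1.2 - p2.2|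
  if d ≤ D ∧ T ≤ b - a - d then 1 else 0

lemma gI_natCast (path : List (Int × Int)) (D T : Int) (a b : Nat) :
    gI path D T a b = pvInd path D T a b := by
  simp [gI, pvInd]

lemma countA_eq (path : List (Int × Int)) (D T : Int) :
    count_cheats path D T =
      ∑ k ∈ Finset.range path.length, ∑ b ∈ Finset.Ico (k + 1) path.length, pvInd path D T k b := by
  unfold count_cheats
  have hbody : ∀ a : Int,
      (fun (result : Int) (b : Int) =>
        let p2 := PySem.List.pyGetD path b (0, 0)
        let distance := |(PySem.List.pyGetD path a (0, 0)).1 - p2.1| + |(PySem.List.pyGetD path a (0, 0)).2 - p2.2|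
        if distance > D then result
        else if b - a - distance ≥ T then result + 1
        else result) = fun result b => result + gI path D T a b := by
    intro a; funext result b
    simp only [gI]
    generalize |(PySem.List.pyGetD path a (0, 0)).1 - (PySem.List.pyGetD path b (0, 0)).1| +
      |(PySem.List.pyGetD path a (0, 0)).2 - (PySem.List.pyGetD path b (0, 0)).2| = d
    split_ifs <;> omega
  have houter : (fun (result : Int) (a : Int) =>
      (PySem.List.pyRange (a + 1) (path.length : Int) 1).foldl (fun result b =>
        let p2 := PySem.List.pyGetD path b (0, 0)
        let distance := |(PySem.List.pyGetD path a (0, 0)).1 - p2.1| + |(PySem.List.pyGetD path a (0, 0)).2 - p2.2|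
        if distance > D then result
        else if b - a - distance ≥ T then result + 1
        else result) result) = fun result a =>
      result + ((PySem.List.pyRange (a + 1) (path.length : Int) 1).map (gI path D T a)).sum := by
    funext result a
    rw [hbody a, PySem.List.foldl_add]
  show (PySem.List.pyRange 0 ((path.length : Int) - 1) 1).foldl (fun (result : Int) (a : Int) =>
      (PySem.List.pyRange (a + 1) (path.length : Int) 1).foldl (fun result b =>
        let p2 := PySem.List.pyGetD path b (0, 0)
        let distance := |(PySem.List.pyGetD path a (0, 0)).1 - p2.1| + |(PySem.List.pyGetD path a (0, 0)).2 - p2.2|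
        if distance > D then result
        else if b - a - distance ≥ T then result + 1
        else result) result) 0 = _
  rw [houter, PySem.List.foldl_add, PySem.List.pyRange_one, List.map_map, sum_map_range]
  simp only [Function.comp_apply, zero_add]
  have hk : ∀ k : Nat,
      (List.map (gI path D T ↑k) (PySem.List.pyRange (↑k + 1) (path.length : Int))).sum =
        ∑ b ∈ Finset.Ico (k + 1) path.length, pvInd path D T k b := by
    intro k
    rw [PySem.List.pyRange_one, List.map_map, sum_map_range, Finset.sum_Ico_eq_sum_range,
      show ((path.length : Int) - (↑k + 1)).toNat = path.length - (k + 1) from by omega]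
    refine Finset.sum_congr rfl fun j _ => ?_
    simp only [Function.comp_apply]
    rw [show ((k : Int) + 1 + ↑j) = ((k + 1 + j : Nat) : Int) from by push_cast; ring, gI_natCast]
  rw [show ((path.length : Int) - 1 - 0).toNat = path.length - 1 from by omega]
  calc ∑ k ∈ Finset.range (path.length - 1),
        (List.map (gI path D T ↑k) (PySem.List.pyRange (↑k + 1) (path.length : Int))).sum
      = ∑ k ∈ Finset.range (path.length - 1), ∑ b ∈ Finset.Ico (k + 1) path.length, pvInd path D T k b :=
        Finset.sum_congr rfl fun k _ => hk k
    _ = ∑ k ∈ Finset.range path.length, ∑ b ∈ Finset.Ico (k + 1) path.length, pvInd path D T k b := by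
        have hsub : Finset.range (path.length - 1) ⊆ Finset.range path.length :=
          by intro t ht; simp only [Finset.mem_range] at ht ⊢; omega
        refine Finset.sum_subset hsub fun x _ hx => ?_
        have hx' : path.length - 1 ≤ x := by simpa using hx
        rw [Finset.Ico_eq_empty (by omega), Finset.sum_empty]

-- ---------- B side ----------

-- full per-pair indicator on enumerated entries: e = (b,(r2,c2)) current, p = (a,(r1,c1)) earlier
def eInd (D T : Int) (e p : Int × (Int × Int)) : Int :=
  if |p.2.1 - e.2.1| + |p.2.2 - e.2.2| ≤ D ∧ e.1 - p.1 - (|p.2.1 - e.2.1| + |p.2.2 - e.2.2|) ≥ T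
  then 1 else 0

-- B's dict after processing a list of enumerated entries
def rowsOf (Q : List (Int × (Int × Int))) : PySem.Dict Int (List (Int × Int)) :=
  Q.foldl (fun d e => d.modify e.2.1 [] (· ++ [(e.2.2, e.1)])) PySem.Dict.empty

-- B's inner double loop as a sum over the dict's items
def bSum (D T : Int) (e : Int × (Int × Int)) (kv : Int × List (Int × Int)) : Int :=
  if |kv.1 - e.2.1| > D then 0
  else (kv.2.map (fun ca =>
    if |kv.1 - e.2.1| + |ca.1 - e.2.2| ≤ D ∧ e.1 - ca.2 - (|kv.1 - e.2.1| + |ca.1 - e.2.2|) ≥ T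
    then (1 : Int) else 0)).sum

-- the row-pruning branch discards only zero buckets
lemma bSum_eq (D T : Int) (e : Int × (Int × Int)) (kv : Int × List (Int × Int)) :
    bSum D T e kv = (kv.2.map (fun ca => eInd D T e (ca.2, (kv.1, ca.1)))).sum := by
  unfold bSum eInd
  by_cases h : |kv.1 - e.2.1| > D
  · rw [if_pos h]
    symm
    apply List.sum_eq_zero
    intro x hx
    simp only [List.mem_map] at hx
    obtain ⟨ca, -, rfl⟩ := hx
    rw [if_neg]
    rintro ⟨h1, -⟩
    have := abs_nonneg (ca.1 - e.2.2)
    omega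
  · rw [if_neg h]

-- B's inner loop from any start equals start + items-sum
lemma innerB_eq (D T : Int) (e : Int × (Int × Int)) (d : PySem.Dict Int (List (Int × Int))) (t : Int) :
    d.items.foldl (fun total kv =>
        let dr := |kv.1 - e.2.1|
        if dr > D then total
        else kv.2.foldl (fun total ca =>
          let dd := dr + |ca.1 - e.2.2|
          if dd ≤ D ∧ e.1 - ca.2 - dd ≥ T then total + 1 else total) total) t
      = t + (d.items.map (bSum D T e)).sum := by
  have hb : (fun (total : Int) (kv : Int × List (Int × Int)) =>
      let dr := |kv.1 - e.2.1|
      if dr > D then total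
      else kv.2.foldl (fun total ca =>
        let dd := dr + |ca.1 - e.2.2|
        if dd ≤ D ∧ e.1 - ca.2 - dd ≥ T then total + 1 else total) total)
      = fun total kv => total + bSum D T e kv := by
    funext total kv
    show (if |kv.1 - e.2.1| > D then total
      else kv.2.foldl (fun total ca =>
        if |kv.1 - e.2.1| + |ca.1 - e.2.2| ≤ D ∧ e.1 - ca.2 - (|kv.1 - e.2.1| + |ca.1 - e.2.2|) ≥ T
        then total + 1 else total) total) = total + bSum D T e kv
    by_cases h : |kv.1 - e.2.1| > D
    · simp [bSum, h]
    · rw [if_neg h]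
      have hin : (fun (total : Int) (ca : Int × Int) =>
          if |kv.1 - e.2.1| + |ca.1 - e.2.2| ≤ D ∧ e.1 - ca.2 - (|kv.1 - e.2.1| + |ca.1 - e.2.2|) ≥ T
          then total + 1 else total)
          = fun total ca => total +
            (if |kv.1 - e.2.1| + |ca.1 - e.2.2| ≤ D ∧ e.1 - ca.2 - (|kv.1 - e.2.1| + |ca.1 - e.2.2|) ≥ T
             then (1 : Int) else 0) := by
        funext total ca; split_ifs <;> omega
      rw [hin, PySem.List.foldl_add]
      unfold bSum
      rw [if_neg h]
  rw [hb, PySem.List.foldl_add]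

-- splitting a sum by a decidable predicate
lemma sum_filter_split (G : (Int × (Int × Int)) → Int) (q : (Int × (Int × Int)) → Bool)
    (l : List (Int × (Int × Int))) :
    ((l.filter q).map G).sum + ((l.filter (fun p => !(q p))).map G).sum = (l.map G).sum := by
  induction l with
  | nil => simp
  | cons p l ihl =>
    by_cases hp : q p = true <;> simp [hp] <;> omega

-- partition: summing a nodup key list's fibers sums the whole list
lemma sum_filter_fibers (G : (Int × (Int × Int)) → Int) :
    ∀ (K : List Int) (l : List (Int × (Int × Int))), K.Nodup → (∀ p ∈ l, p.1 ∈ K) →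
    (K.map (fun r => ((l.filter (fun p => p.1 == r)).map G).sum)).sum = (l.map G).sum := by
  intro K
  induction K with
  | nil =>
    intro l _ hcov
    have : l = [] := List.eq_nil_iff_forall_not_mem.mpr (fun p hp => by simpa using hcov p hp)
    simp [this]
  | cons r K ih =>
    intro l hnd hcov
    have hnd' : K.Nodup := (List.nodup_cons.mp hnd).2
    have hr : r ∉ K := (List.nodup_cons.mp hnd).1
    have hsplit : ((l.filter (fun p => p.1 == r)).map G).sum +
        ((l.filter (fun p => !(p.1 == r))).map G).sum = (l.map G).sum :=
      sum_filter_split G (fun p => p.1 == r) l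
    have htail : ∀ r' ∈ K, l.filter (fun p => p.1 == r')
        = (l.filter (fun p => !(p.1 == r))).filter (fun p => p.1 == r') := by
      intro r' hr'
      rw [List.filter_filter]
      apply List.filter_congr
      intro p _
      have hne : r' ≠ r := fun h => hr (h ▸ hr')
      by_cases hp : p.1 = r' <;> simp [hp] <;> omega
    have hcov' : ∀ p ∈ l.filter (fun p => !(p.1 == r)), p.1 ∈ K := by
      intro p hp
      rw [List.mem_filter] at hp
      have hm := hcov p hp.1
      simp only [List.mem_cons] at hm
      rcases hm with h | h
      · exfalso; have := hp.2; simp [h] at this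
      · exact h
    calc ((r :: K).map (fun r => ((l.filter (fun p => p.1 == r)).map G).sum)).sum
        = ((l.filter (fun p => p.1 == r)).map G).sum +
          (K.map (fun r' => ((l.filter (fun p => p.1 == r')).map G).sum)).sum := by simp
      _ = ((l.filter (fun p => p.1 == r)).map G).sum +
          (K.map (fun r' => (((l.filter (fun p => !(p.1 == r))).filter (fun p => p.1 == r')).map G).sum)).sum := by
          congr 1
          apply congrArg
          exact List.map_congr_left (fun r' hr' => by rw [htail r' hr'])
      _ = ((l.filter (fun p => p.1 == r)).map G).sum +
          ((l.filter (fun p => !(p.1 == r))).map G).sum := by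
          rw [ih (l.filter (fun p => !(p.1 == r))) hnd' hcov']
      _ = (l.map G).sum := hsplit

-- the items-sum over rowsOf Q is the plain sum over Q
lemma innerSum_rowsOf (D T : Int) (e : Int × (Int × Int)) (Q : List (Int × (Int × Int))) :
    ((rowsOf Q).items.map (bSum D T e)).sum = (Q.map (eInd D T e)).sum := by
  have hfold : rowsOf Q = (Q.map (fun e => (e.2.1, (e.2.2, e.1)))).foldl
      (fun d p => d.modify p.1 [] (· ++ [p.2])) PySem.Dict.empty := by
    rw [List.foldl_map]; rfl
  have hnd : (rowsOf Q).keys.Nodup := by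
    rw [hfold]
    exact PySem.Dict.nodup_keys_foldl_modify_key
      (Q.map (fun e => (e.2.1, (e.2.2, e.1))))
      (fun (p : Int × (Int × Int)) => p.1) []
      (fun (_ : PySem.Dict Int (List (Int × Int))) (p : Int × (Int × Int)) => (· ++ [p.2]))
      PySem.Dict.empty PySem.Dict.nodup_keys_empty
  have hgetD : ∀ r : Int, (rowsOf Q).getD r []
      = ((Q.map (fun e => (e.2.1, (e.2.2, e.1)))).filter (fun p => p.1 == r)).map (·.2) := by
    intro r
    rw [hfold, PySem.Dict.getD_foldl_modify_append, PySem.Dict.getD_empty]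
    simp
  have hitems : (rowsOf Q).items = (rowsOf Q).keys.map (fun r => (r, (rowsOf Q).getD r [])) :=
    PySem.Dict.items_eq_map_keys (rowsOf Q) hnd []
  have hcov : ∀ p ∈ Q.map (fun e => (e.2.1, (e.2.2, e.1))), p.1 ∈ (rowsOf Q).keys := by
    intro p hp
    rw [hfold, PySem.Dict.keys_foldl_modify_key]
    simp only [PySem.Dict.keys_empty, PySem.Set.update_nil_left]
    rw [PySem.Set.mem_ofList]
    exact List.mem_map_of_mem hp
  calc ((rowsOf Q).items.map (bSum D T e)).sum
      = ((rowsOf Q).keys.map (fun r => bSum D T e (r, (rowsOf Q).getD r []))).sum := by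
        rw [hitems, List.map_map]; rfl
    _ = ((rowsOf Q).keys.map (fun r =>
          (((Q.map (fun e => (e.2.1, (e.2.2, e.1)))).filter (fun p => p.1 == r)).map
            (fun p => eInd D T e (p.2.2, (p.1, p.2.1)))).sum)).sum := by
        apply congrArg
        apply List.map_congr_left
        intro r _
        rw [bSum_eq, hgetD r, List.map_map]
        apply congrArg
        apply List.map_congr_left
        intro p hp
        have hpr : p.1 = r := by
          rw [List.mem_filter] at hp
          simpa using hp.2
        simp [hpr]
    _ = ((Q.map (fun e => (e.2.1, (e.2.2, e.1)))).map
          (fun p => eInd D T e (p.2.2, (p.1, p.2.1)))).sum :=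
        sum_filter_fibers _ (rowsOf Q).keys _ hnd hcov
    _ = (Q.map (eInd D T e)).sum := by
        rw [List.map_map]
        apply congrArg
        apply List.map_congr_left
        intro q _
        simp [eInd]

-- spec-level recursion of B's pass
def contribSpec (D T : Int) : List (Int × (Int × Int)) → List (Int × (Int × Int)) → Int
  | [], _ => 0
  | e :: L, Q => (Q.map (eInd D T e)).sum + contribSpec D T L (Q ++ [e])

lemma rowsOf_snoc (Q : List (Int × (Int × Int))) (e : Int × (Int × Int)) :
    rowsOf (Q ++ [e]) = (rowsOf Q).modify e.2.1 [] (· ++ [(e.2.2, e.1)]) := by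
  simp [rowsOf]

-- B's step function, named for the proofs (definitionally the fold body of the port)
def stepB (D T : Int) (st : PySem.Dict Int (List (Int × Int)) × Int) (e : Int × (Int × Int)) :
    PySem.Dict Int (List (Int × Int)) × Int :=
  let b := e.1
  let r2 := e.2.1
  let c2 := e.2.2
  let total := st.1.items.foldl (fun total kv =>
    let dr := |kv.1 - r2|
    if dr > D then total
    else kv.2.foldl (fun total ca =>
      let d := dr + |ca.1 - c2|
      if d ≤ D ∧ b - ca.2 - d ≥ T then total + 1 else total) total)
    st.2
  (st.1.modify r2 [] (· ++ [(c2, b)]), total)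

lemma stepB_eq (D T : Int) (Q : List (Int × (Int × Int))) (t : Int) (e : Int × (Int × Int)) :
    stepB D T (rowsOf Q, t) e = (rowsOf (Q ++ [e]), t + (Q.map (eInd D T e)).sum) := by
  show ((rowsOf Q).modify e.2.1 [] (· ++ [(e.2.2, e.1)]),
    (rowsOf Q).items.foldl (fun total kv =>
      let dr := |kv.1 - e.2.1|
      if dr > D then total
      else kv.2.foldl (fun total ca =>
        let d := dr + |ca.1 - e.2.2|
        if d ≤ D ∧ e.1 - ca.2 - d ≥ T then total + 1 else total) total) t) = _
  rw [rowsOf_snoc, innerB_eq, innerSum_rowsOf]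

-- B's fold computes contribSpec
lemma foldB_eq (D T : Int) :
    ∀ (L Q : List (Int × (Int × Int))) (t : Int),
    (L.foldl (stepB D T) (rowsOf Q, t)).2 = t + contribSpec D T L Q := by
  intro L
  induction L with
  | nil => intro Q t; simp [contribSpec]
  | cons e L ih =>
    intro Q t
    rw [List.foldl_cons, stepB_eq, ih (Q ++ [e]) (t + (Q.map (eInd D T e)).sum)]
    show _ = t + ((Q.map (eInd D T e)).sum + contribSpec D T L (Q ++ [e]))
    omega

lemma contribSpec_eq (D T : Int) :
    ∀ (L Q : List (Int × (Int × Int))),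
    contribSpec D T L Q =
      ∑ j ∈ Finset.range L.length, ((Q ++ L.take j).map (eInd D T (L.getD j (0, (0, 0))))).sum := by
  intro L
  induction L with
  | nil => intro Q; simp [contribSpec]
  | cons e L ih =>
    intro Q
    have hF0 : ((Q ++ (e :: L).take 0).map (eInd D T ((e :: L).getD 0 (0, (0, 0))))).sum
        = (Q.map (eInd D T e)).sum := by simp
    have hFs : ∀ j, ((Q ++ (e :: L).take (j + 1)).map (eInd D T ((e :: L).getD (j + 1) (0, (0, 0))))).sum
        = (((Q ++ [e]) ++ L.take j).map (eInd D T (L.getD j (0, (0, 0))))).sum := by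
      intro j
      rw [List.take_succ_cons, List.getD_cons_succ,
        show Q ++ e :: L.take j = (Q ++ [e]) ++ L.take j from by simp]
    show (Q.map (eInd D T e)).sum + contribSpec D T L (Q ++ [e])
      = ∑ j ∈ Finset.range (L.length + 1),
          ((Q ++ (e :: L).take j).map (eInd D T ((e :: L).getD j (0, (0, 0))))).sum
    rw [Finset.sum_range_succ', hF0, ih (Q ++ [e]),
      Finset.sum_congr rfl (fun j _ => hFs j)]
    exact add_comm _ _

lemma countB_eq (path : List (Int × Int)) (D T : Int) :
    count_cheats_alt path D T =
      ∑ b ∈ Finset.range path.length, ∑ a ∈ Finset.range b, pvInd path D T a b := by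
  have hfold := foldB_eq D T (PySem.List.enumerate path 0) [] 0
  have hport : count_cheats_alt path D T
      = ((PySem.List.enumerate path 0).foldl (stepB D T) (rowsOf [], 0)).2 := rfl
  rw [hport, hfold, zero_add, contribSpec_eq, PySem.List.length_enumerate]
  refine Finset.sum_congr rfl fun j hj => ?_
  rw [Finset.mem_range] at hj
  rw [List.nil_append]
  have hgj : (PySem.List.enumerate path 0).getD j (0, (0, 0)) = ((j : Int), path[j]) := by
    rw [List.getD_eq_getElem _ _ (by rw [PySem.List.length_enumerate]; exact hj),
      PySem.List.getElem_enumerate]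
    simp
  rw [hgj]
  have htake : ((PySem.List.enumerate path 0).take j).map (eInd D T ((j : Int), path[j]))
      = (List.range j).map (fun a => pvInd path D T a j) := by
    apply List.ext_getElem
    · simp [PySem.List.length_enumerate]; omega
    · intro i h1 h2
      have hij : i < j := by simpa using h2
      have hi : i < path.length := by omega
      simp only [List.getElem_map, List.getElem_take, List.getElem_range,
        PySem.List.getElem_enumerate]
      simp only [eInd, pvInd]
      rw [List.getD_eq_getElem _ _ hi, List.getD_eq_getElem _ _ hj]
      norm_num
  rw [htake, sum_map_range]

-- exchanging A's traversal order into B's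
lemma sum_exchange (N : Nat) (f : Nat → Nat → Int) :
    ∑ k ∈ Finset.range N, ∑ b ∈ Finset.Ico (k + 1) N, f k b =
      ∑ b ∈ Finset.range N, ∑ a ∈ Finset.range b, f a b := by
  rw [Finset.sum_sigma', Finset.sum_sigma']
  refine Finset.sum_nbij' (fun q => ⟨q.2, q.1⟩) (fun q => ⟨q.2, q.1⟩) ?_ ?_ ?_ ?_ ?_ <;>
      rintro ⟨x, y⟩ h <;>
      simp only [Finset.mem_sigma, Finset.mem_range, Finset.mem_Ico] at h ⊢ <;> omega

-- ===== VERDICT (by name: the statement is the Claim_ definition above) =====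
theorem count_cheats_spec : Claim_equal_count_cheats := by
  intro path D T _
  show count_cheats path D T = count_cheats_alt path D T
  rw [countA_eq, countB_eq, sum_exchange]
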